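-- pv_equiv track=rewrite | github.com/grigor-minasyan/rtu-dcpx-interrogator | DCPx_functions.py | DCP_genCmndBCH
-- ===== SOURCE A (Python) =====
-- def DCP_genCmndBCH(buffer, count):
--     bch, nBCHpoly, fBCHpoly = (0, 0xb8, 0xff)
--     # 2 for accounting framing bytes
--     for i in range(0, count):
--         bch ^= buffer[i]
--         for j in range(8):
--             if ((bch & 1) == 1):
--                 bch = (bch >> 1) ^ nBCHpoly
--             else:
--                 bch >>= 1
--     bch ^= fBCHpoly
--     return bch
-- ===== SOURCE B (Python) =====
-- # Table-driven BCH: the 8-step bit loop is precomputed for every byte value; per input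
-- # element a single table lookup plus a '>> 8' linear correction replaces the inner loop.
-- def _bch_byte(x):
--     for _ in range(8):
--         x = (x >> 1) ^ 0xb8 if x & 1 else x >> 1
--     return x
--
-- _BCH_TABLE = [_bch_byte(x) for x in range(256)]
--
-- def DCP_genCmndBCH(buffer, count):
--     bch = 0
--     for i in range(count):
--         t = bch ^ buffer[i]
--         bch = _BCH_TABLE[t & 0xff] ^ (t >> 8)
--     return bch ^ 0xff
-- ===== Notes on version B (the rewrite author's own statement) =====
-- stated objective: faster
-- what changed: Replaces A's per-element 8-iteration bit loop with a 256-entry table precomputed once from the bit loop, so each buffer element costs one table lookup xor'd with the high bits shifted down by 8.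
import Mathlib
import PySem

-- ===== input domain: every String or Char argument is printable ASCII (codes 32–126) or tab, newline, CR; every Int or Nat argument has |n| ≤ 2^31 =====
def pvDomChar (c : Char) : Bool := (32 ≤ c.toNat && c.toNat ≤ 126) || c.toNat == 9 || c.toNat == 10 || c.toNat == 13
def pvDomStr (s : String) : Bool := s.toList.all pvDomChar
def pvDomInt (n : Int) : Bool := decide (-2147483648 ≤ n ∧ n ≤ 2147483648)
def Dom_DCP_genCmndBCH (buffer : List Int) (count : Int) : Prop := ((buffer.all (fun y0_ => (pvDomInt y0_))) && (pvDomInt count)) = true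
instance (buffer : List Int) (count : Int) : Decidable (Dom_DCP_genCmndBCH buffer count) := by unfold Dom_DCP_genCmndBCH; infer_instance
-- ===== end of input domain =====

-- B replaces A's 8-iteration inner bit loop by a 256-entry table precomputed once, with a
-- '>>> 8' xor-correction for the high bits; equal return value, constant-factor faster.

-- ===== PORT A =====
def DCP_genCmndBCH (buffer : List Int) (count : Int) : Int :=
  let nBCHpoly : Int := 0xb8
  let fBCHpoly : Int := 0xff
  let bch : Int :=
    (PySem.List.pyRange 0 count).foldl (fun bch i =>
      let bch := PySem.Int.bxor bch (PySem.List.pyGetD buffer i 0)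
      (PySem.List.pyRange 0 8).foldl (fun bch _ =>
        if PySem.Int.band bch 1 == 1 then PySem.Int.bxor (bch >>> (1 : Nat)) nBCHpoly
        else bch >>> (1 : Nat)) bch) 0
  PySem.Int.bxor bch fBCHpoly

-- ===== PORT B =====
-- helper _bch_byte of Source B: the 8-step bit loop on one value
def pvBchByte (x : Int) : Int :=
  (PySem.List.pyRange 0 8).foldl (fun x _ =>
    if PySem.Int.band x 1 == 1 then PySem.Int.bxor (x >>> (1 : Nat)) 0xb8
    else x >>> (1 : Nat)) x

-- _BCH_TABLE of Source B, precomputed once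
def pvBchTable : List Int := (PySem.List.pyRange 0 256).map pvBchByte

def DCP_genCmndBCH_alt (buffer : List Int) (count : Int) : Int :=
  let bch : Int :=
    (PySem.List.pyRange 0 count).foldl (fun bch i =>
      let t := PySem.Int.bxor bch (PySem.List.pyGetD buffer i 0)
      PySem.Int.bxor (PySem.List.pyGetD pvBchTable (PySem.Int.band t 255) 0) (t >>> (8 : Nat))) 0
  PySem.Int.bxor bch 0xff

-- ===== PRECONDITION & SPEC =====
-- Pre_ excludes exactly the inputs where A raises IndexError (count exceeds the buffer length).
def Pre_DCP_genCmndBCH (buffer : List Int) (count : Int) : Prop := count ≤ (buffer.length : Int)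
instance (buffer : List Int) (count : Int) : Decidable (Pre_DCP_genCmndBCH buffer count) := by unfold Pre_DCP_genCmndBCH; infer_instance

def pvWitness_DCP_genCmndBCH : List Int × Int := ([1, 2, 3], 3)

def Spec_DCP_genCmndBCH (buffer : List Int) (count : Int) (out : Int) : Prop := out = DCP_genCmndBCH_alt buffer count
instance (buffer : List Int) (count : Int) (out : Int) : Decidable (Spec_DCP_genCmndBCH buffer count out) := by unfold Spec_DCP_genCmndBCH; infer_instance

-- ===== CLAIM (what is proved, stated in full; the proofs are below) =====
def Claim_equal_DCP_genCmndBCH : Prop := ∀ (buffer : List Int) (count : Int), Dom_DCP_genCmndBCH buffer count → Pre_DCP_genCmndBCH buffer count → Spec_DCP_genCmndBCH buffer count (DCP_genCmndBCH buffer count)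

-- ===== LEMMAS AND PROOFS =====

-- the single bit step both programs use, and its k-fold repetition
def pvStep (x : Int) : Int :=
  if PySem.Int.band x 1 == 1 then PySem.Int.bxor (x >>> (1 : Nat)) 0xb8 else x >>> (1 : Nat)

def pvStepN : Nat → Int → Int
  | 0, x => x
  | k + 1, x => pvStepN k (pvStep x)

-- bitwise toolkit on Int.testBit
theorem pv_int_ext (a b : Int) (h : ∀ i : Nat, a.testBit i = b.testBit i) : a = b := by
  cases a with
  | ofNat m =>
    cases b with
    | ofNat n =>
      have : m = n := Nat.eq_of_testBit_eq (fun i => by simpa [Int.testBit] using h i)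
      simp [this]
    | negSucc n =>
      exfalso
      have h1 := h (m + n)
      have hm : m.testBit (m + n) = false := Nat.testBit_eq_false_of_lt (lt_of_le_of_lt (Nat.le_add_right m n) (Nat.lt_two_pow_self))
      have hn : n.testBit (m + n) = false := Nat.testBit_eq_false_of_lt (lt_of_le_of_lt (Nat.le_add_left n m) (Nat.lt_two_pow_self))
      simp [Int.testBit, hm, hn] at h1
  | negSucc m =>
    cases b with
    | ofNat n =>
      exfalso
      have h1 := h (m + n)
      have hm : m.testBit (m + n) = false := Nat.testBit_eq_false_of_lt (lt_of_le_of_lt (Nat.le_add_right m n) (Nat.lt_two_pow_self))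
      have hn : n.testBit (m + n) = false := Nat.testBit_eq_false_of_lt (lt_of_le_of_lt (Nat.le_add_left n m) (Nat.lt_two_pow_self))
      simp [Int.testBit, hm, hn] at h1
    | negSucc n =>
      have : m = n := Nat.eq_of_testBit_eq (fun i => by have := h i; simpa [Int.testBit] using this)
      simp [this]

theorem pv_bxor_eq_xor (a b : Int) : PySem.Int.bxor a b = Int.xor a b := by
  cases a with
  | ofNat m =>
    cases b with
    | ofNat n => simp [PySem.Int.bxor, Int.xor]
    | negSucc n =>
      simp [PySem.Int.bxor, Int.xor, Int.negSucc_eq]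
      rw [if_neg (by omega)]
      omega
  | negSucc m =>
    cases b with
    | ofNat n =>
      simp [PySem.Int.bxor, Int.xor, Int.negSucc_eq]
      rw [if_neg (by omega)]
      omega
    | negSucc n =>
      simp [PySem.Int.bxor, Int.xor, Int.negSucc_eq]
      rw [if_neg (by omega)]
      omega

theorem pv_tb_bxor (a b : Int) (i : Nat) :
    (PySem.Int.bxor a b).testBit i = ((a.testBit i) ^^ (b.testBit i)) := by
  rw [pv_bxor_eq_xor]; exact Int.testBit_lxor a b i

theorem pv_tb_shr (a : Int) (k j : Nat) : (a >>> k).testBit j = a.testBit (k + j) := by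
  cases a with
  | ofNat m =>
    have e : (Int.ofNat m) >>> k = Int.ofNat (m >>> k) := rfl
    rw [e]; simp [Int.testBit, Nat.testBit_shiftRight]
  | negSucc m =>
    have e : (Int.negSucc m) >>> k = Int.negSucc (m >>> k) := rfl
    rw [e]; simp [Int.testBit, Nat.testBit_shiftRight]

theorem pv_tb_two_mul (q : Int) (i : Nat) :
    (2 * q).testBit i = if i = 0 then false else q.testBit (i - 1) := by
  cases q with
  | ofNat m =>
    have e : (2 : Int) * Int.ofNat m = Int.ofNat (2 * m) := by simp
    rw [e]
    cases i with
    | zero => simp [Int.testBit, Nat.testBit_zero, Nat.mul_mod_right]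
    | succ j => simp [Int.testBit, Nat.testBit_succ]
  | negSucc m =>
    have e : (2 : Int) * Int.negSucc m = Int.negSucc (2 * m + 1) := by
      simp [Int.negSucc_eq]; ring
    rw [e]
    cases i with
    | zero => simp [Int.testBit, Nat.testBit_zero]
    | succ j =>
      have h2 : (2 * m + 1) / 2 = m := by omega
      simp [Int.testBit, Nat.testBit_succ, h2]

theorem pv_tb_pow2_mul (k : Nat) (q : Int) (i : Nat) :
    (2 ^ k * q).testBit i = if k ≤ i then q.testBit (i - k) else false := by
  induction k generalizing i with
  | zero => simp
  | succ k ih =>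
    have e : (2 : Int) ^ (k + 1) * q = 2 * (2 ^ k * q) := by ring
    rw [e, pv_tb_two_mul]
    cases i with
    | zero => simp
    | succ j =>
      simp only [Nat.add_sub_cancel, if_neg (Nat.succ_ne_zero j)]
      rw [ih j]
      by_cases h : k ≤ j
      · rw [if_pos h, if_pos (by omega)]
        congr 1
        omega
      · rw [if_neg h, if_neg (by omega)]

theorem pv_nat_sub_255 : ∀ u : Nat, u < 256 → 255 - u = 255 ^^^ u := by
  set_option maxRecDepth 8192 in decide

theorem pv_tb_band255 (t : Int) (i : Nat) :
    (PySem.Int.band t 255).testBit i = (t.testBit i && decide (i < 8)) := by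
  have h255 : ∀ j : Nat, (255 : Nat).testBit j = decide (j < 8) := by
    intro j
    have h := Nat.testBit_two_pow_sub_one 8 j
    norm_num at h
    exact h
  cases t with
  | ofNat m =>
    have e : PySem.Int.band (Int.ofNat m) 255 = Int.ofNat (m &&& 255) := by
      simp [PySem.Int.band]
    rw [e]
    simp [Int.testBit, Nat.testBit_and, h255]
  | negSucc m =>
    have e : PySem.Int.band (Int.negSucc m) 255 = Int.ofNat (255 - (255 &&& m)) := by
      simp [PySem.Int.band, Int.negSucc_eq]
      intro hc
      exact absurd hc (by omega)
    rw [e, pv_nat_sub_255 _ (by have := Nat.and_le_left (n := 255) (m := m); omega)]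
    simp [Int.testBit, Nat.testBit_xor, Nat.testBit_and, h255]
    by_cases h : i < 8 <;> simp [h]

theorem pv_band255_natCast (t : Int) : ∃ r : Nat, r < 256 ∧ PySem.Int.band t 255 = (r : Int) := by
  cases t with
  | ofNat m =>
    refine ⟨m &&& 255, ?_, by simp [PySem.Int.band]⟩
    have := Nat.and_le_right (n := m) (m := 255); omega
  | negSucc m =>
    refine ⟨255 - (255 &&& m), by omega, ?_⟩
    simp [PySem.Int.band, Int.negSucc_eq]
    intro hc
    exact absurd hc (by omega)

theorem pv_band_one_tb (y : Int) : PySem.Int.band y 1 = if y.testBit 0 then 1 else 0 := by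
  cases y with
  | ofNat m =>
    have e : PySem.Int.band (Int.ofNat m) 1 = Int.ofNat (m &&& 1) := by simp [PySem.Int.band]
    rw [e, Nat.and_one_is_mod]
    simp [Int.testBit, Nat.testBit_zero]
    omega
  | negSucc m =>
    have e : PySem.Int.band (Int.negSucc m) 1 = Int.ofNat (1 - (1 &&& m)) := by
      simp [PySem.Int.band, Int.negSucc_eq]
      intro hc
      exact absurd hc (by omega)
    rw [e, Nat.and_comm, Nat.and_one_is_mod]
    simp [Int.testBit, Nat.testBit_zero]
    omega

theorem pv_shr_bxor (a b : Int) : (PySem.Int.bxor a b) >>> (1 : Nat) = PySem.Int.bxor (a >>> (1 : Nat)) (b >>> (1 : Nat)) := by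
  apply pv_int_ext
  intro i
  simp [pv_tb_shr, pv_tb_bxor]

theorem pv_two_mul_shr (q : Int) : (2 * q) >>> (1 : Nat) = q := by
  apply pv_int_ext
  intro i
  rw [pv_tb_shr, pv_tb_two_mul]
  simp

theorem pv_bxor_right_comm (a b c : Int) :
    PySem.Int.bxor (PySem.Int.bxor a b) c = PySem.Int.bxor (PySem.Int.bxor a c) b := by
  apply pv_int_ext
  intro i
  simp only [pv_tb_bxor]
  cases a.testBit i <;> cases b.testBit i <;> cases c.testBit i <;> rfl

theorem pv_step_bxor (x q : Int) :
    pvStep (PySem.Int.bxor x (2 * q)) = PySem.Int.bxor (pvStep x) q := by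
  have hcond : PySem.Int.band (PySem.Int.bxor x (2 * q)) 1 = PySem.Int.band x 1 := by
    rw [pv_band_one_tb, pv_band_one_tb, pv_tb_bxor, pv_tb_two_mul]
    simp
  have hshr : (PySem.Int.bxor x (2 * q)) >>> (1 : Nat) = PySem.Int.bxor (x >>> (1 : Nat)) q := by
    rw [pv_shr_bxor, pv_two_mul_shr]
  unfold pvStep
  rw [hcond, hshr]
  by_cases h : PySem.Int.band x 1 == 1
  · rw [if_pos h, if_pos h, pv_bxor_right_comm]
  · rw [if_neg h, if_neg h]

theorem pv_stepN_bxor (k : Nat) (x q : Int) :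
    pvStepN k (PySem.Int.bxor x (2 ^ k * q)) = PySem.Int.bxor (pvStepN k x) q := by
  induction k generalizing x with
  | zero => simp [pvStepN]
  | succ k ih =>
    have e : (2 : Int) ^ (k + 1) * q = 2 * (2 ^ k * q) := by ring
    show pvStepN k (pvStep (PySem.Int.bxor x (2 ^ (k + 1) * q))) = _
    rw [e, pv_step_bxor, ih]
    rfl

-- byte/high-part decomposition of an integer
theorem pv_decomp (t : Int) :
    PySem.Int.bxor (PySem.Int.band t 255) (2 ^ 8 * (t >>> (8 : Nat))) = t := by
  apply pv_int_ext
  intro i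
  rw [pv_tb_bxor, pv_tb_band255, pv_tb_pow2_mul]
  by_cases h : i < 8
  · have h8 : ¬ (8 ≤ i) := by omega
    simp [h, h8]
  · rw [if_pos (by omega), pv_tb_shr]
    have h8 : 8 + (i - 8) = i := by omega
    simp [h, h8]

theorem pv_bchByte_eq_stepN (x : Int) : pvBchByte x = pvStepN 8 x := by
  have h : PySem.List.pyRange 0 8 = [0, 1, 2, 3, 4, 5, 6, 7] := by decide
  rw [pvBchByte, h]
  rfl

-- the key per-element identity: A's inner loop = table lookup ^ high-part shift
theorem pv_key (t : Int) :
    pvStepN 8 t = PySem.Int.bxor (PySem.List.pyGetD pvBchTable (PySem.Int.band t 255) 0) (t >>> (8 : Nat)) := by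
  obtain ⟨r, hr, he⟩ := pv_band255_natCast t
  have hlook : PySem.List.pyGetD pvBchTable (PySem.Int.band t 255) 0 = pvBchByte (r : Int) := by
    rw [he, pvBchTable]
    have h256 : (256 : Int) = ((256 : Nat) : Int) := by norm_num
    rw [h256]
    exact PySem.List.pyGetD_map_pyRange pvBchByte 256 r 0 hr
  rw [hlook, pv_bchByte_eq_stepN, ← he]
  conv_lhs => rw [← pv_decomp t]
  rw [pv_stepN_bxor]

-- ===== VERDICT (by name: the statement is the Claim_ definition above) =====
theorem DCP_genCmndBCH_spec : Claim_equal_DCP_genCmndBCH := by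
  intro buffer count _ _
  unfold Spec_DCP_genCmndBCH DCP_genCmndBCH DCP_genCmndBCH_alt
  have hfun : (fun (bch i : Int) =>
      let bch := PySem.Int.bxor bch (PySem.List.pyGetD buffer i 0)
      (PySem.List.pyRange 0 8).foldl (fun bch _ =>
        if PySem.Int.band bch 1 == 1 then PySem.Int.bxor (bch >>> (1 : Nat)) 0xb8
        else bch >>> (1 : Nat)) bch)
      = (fun (bch i : Int) =>
      let t := PySem.Int.bxor bch (PySem.List.pyGetD buffer i 0)
      PySem.Int.bxor (PySem.List.pyGetD pvBchTable (PySem.Int.band t 255) 0) (t >>> (8 : Nat))) := by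
    funext b i
    show pvBchByte (PySem.Int.bxor b (PySem.List.pyGetD buffer i 0)) = _
    rw [pv_bchByte_eq_stepN, pv_key]
  simp only [hfun]
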